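-- pv_equiv track=rewrite | github.com/kengiroy2-g/kenobase | Old_Code/send_text_to_TTS_DIKTAT_V1.py | insert_break_after_n_words
-- ===== SOURCE A (Python) =====
-- def insert_break_after_n_words(text, n=4):
--     words = text.split()
--     word_count = 0
--     new_words = []
--
--     for word in words:
--         new_words.append(word)
--         if not any(satzzeichen[c] in word for c in satzzeichen):
--             word_count += 1
--         else:
--             word_count = 0
--         if word_count == n:
--             new_words.append('<break time="6s"/>')
--             word_count = 0
--
--     return ' '.join(new_words)
--
-- satzzeichen = {'.': ' Punkt', ',': ' Komma', ';': ' Semikolon', ':': ' Doppelpunkt', '!': ' Ausrufezeichen', '?': ' Fragezeichen', '-': ' Bindestrich', '–': ' Gedankenstrich', '„': ' Anführungszeichen unten', '“': ' Anführungszeichen oben', '‘': ' Apostroph links', '’': ' Apostroph rechts', '(': ' Runde Klammer auf', ')': ' Runde Klammer zu', '[': ' Eckige Klammer auf', ']': ' Eckige Klammer zu', '{': ' Geschweifte Klammer auf', '}': ' Geschweifte Klammer zu', '/': ' Schrägstrich', '\\': ' Umgekehrter Schrägstrich', '@': ' At-Zeichen', '#': ' Hashtag', '$': ' Dollarzeichen',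 '%': ' Prozentzeichen', '^': ' Hochgestelltes Zeichen', '&': ' Und-Zeichen', '*': ' Stern', '+': ' Pluszeichen', '=': ' Gleichheitszeichen', '<': ' Kleiner als', '>': ' Größer als', '|': ' Senkrechter Strich', '~': ' Tilde', '`': ' Gravis'}
-- ===== SOURCE B (Python) =====
-- def insert_break_after_n_words(text, n=4):
--     # The punctuation table in A is dead code: every looked-up value starts with
--     # a space and split() tokens never contain spaces, so A just counts words.
--     # B therefore walks the word list in fixed-size blocks of n.
--     words = text.split()
--     if n <= 0:
--         return ' '.join(words)
--     out = []
--     for i in range(0, len(words), n):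
--         block = words[i:i + n]
--         out.extend(block)
--         if len(block) == n:
--             out.append('<break time="6s"/>')
--     return ' '.join(out)
-- ===== Notes on version B (the rewrite author's own statement) =====
-- stated objective: simpler
-- what changed: B drops A's per-word punctuation scan (dead code: every looked-up dict value contains a space, which split() tokens never do) and replaces the running word counter with iteration over the word list in fixed-size blocks of n, appending the break marker after each full block.
import Mathlib
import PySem

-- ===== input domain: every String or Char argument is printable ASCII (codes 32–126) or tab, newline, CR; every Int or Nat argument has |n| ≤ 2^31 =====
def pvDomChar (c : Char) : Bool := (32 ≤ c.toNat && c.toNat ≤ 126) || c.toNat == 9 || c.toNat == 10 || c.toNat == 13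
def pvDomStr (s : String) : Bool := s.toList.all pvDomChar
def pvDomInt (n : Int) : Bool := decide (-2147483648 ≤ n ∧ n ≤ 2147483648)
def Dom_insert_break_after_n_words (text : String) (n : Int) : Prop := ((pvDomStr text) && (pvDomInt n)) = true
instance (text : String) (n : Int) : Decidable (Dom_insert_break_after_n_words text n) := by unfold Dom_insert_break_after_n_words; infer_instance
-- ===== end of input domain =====

-- B drops A's per-word punctuation scan (dead code: every looked-up value contains a space,
-- which split() tokens never do) and the running counter, iterating instead over the word
-- list in fixed-size blocks of n; objective: simpler.

-- ===== PORT A =====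
def satzzeichen : PySem.Dict String String := PySem.Dict.ofList
  [(".", " Punkt"), (",", " Komma"), (";", " Semikolon"), (":", " Doppelpunkt"),
   ("!", " Ausrufezeichen"), ("?", " Fragezeichen"), ("-", " Bindestrich"),
   ("–", " Gedankenstrich"), ("„", " Anführungszeichen unten"), ("“", " Anführungszeichen oben"),
   ("‘", " Apostroph links"), ("’", " Apostroph rechts"), ("(", " Runde Klammer auf"),
   (")", " Runde Klammer zu"), ("[", " Eckige Klammer auf"), ("]", " Eckige Klammer zu"),
   ("{", " Geschweifte Klammer auf"), ("}", " Geschweifte Klammer zu"), ("/", " Schrägstrich"),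
   ("\\", " Umgekehrter Schrägstrich"), ("@", " At-Zeichen"), ("#", " Hashtag"),
   ("$", " Dollarzeichen"), ("%", " Prozentzeichen"), ("^", " Hochgestelltes Zeichen"),
   ("&", " Und-Zeichen"), ("*", " Stern"), ("+", " Pluszeichen"), ("=", " Gleichheitszeichen"),
   ("<", " Kleiner als"), (">", " Größer als"), ("|", " Senkrechter Strich"),
   ("~", " Tilde"), ("`", " Gravis")]

-- A's loop: append the word, update the counter via the punctuation scan
-- ('satzzeichen[c] in word' = substring test; c ranges over the keys, all present, so getD is exact),
-- insert the break marker when the counter reaches n.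
def insert_break_after_n_words (text : String) (n : Int) : String :=
  let words := PySem.Str.split₀ text
  let st := words.foldl
    (fun (st : Int × List String) (word : String) =>
      let new_words := st.2 ++ [word]
      let word_count :=
        if !(satzzeichen.keys.any (fun c => PySem.Str.isIn (satzzeichen.getD c "") word))
          then st.1 + 1 else 0
      if word_count == n then (0, new_words ++ ["<break time=\"6s\"/>"])
      else (word_count, new_words))
    ((0 : Int), ([] : List String))
  PySem.Str.join " " st.2

-- ===== PORT B =====
def insert_break_after_n_words_alt (text : String) (n : Int) : String :=
  let words := PySem.Str.split₀ text
  if n ≤ 0 then PySem.Str.join " " words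
  else
    let out := (PySem.List.pyRange 0 (words.length : Int) n).foldl
      (fun (out : List String) (i : Int) =>
        let block := PySem.List.slice words (some i) (some (i + n))
        let out := out ++ block
        if ((block.length : Int) == n) then out ++ ["<break time=\"6s\"/>"] else out)
      ([] : List String)
    PySem.Str.join " " out

-- ===== PRECONDITION & SPEC =====
def Spec_insert_break_after_n_words (text : String) (n : Int) (out : String) : Prop := out = insert_break_after_n_words_alt text n
instance (text : String) (n : Int) (out : String) : Decidable (Spec_insert_break_after_n_words text n out) := by unfold Spec_insert_break_after_n_words; infer_instance

-- ===== CLAIM (what is proved, stated in full; the proofs are below) =====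
def Claim_equal_insert_break_after_n_words : Prop := ∀ (text : String) (n : Int), Dom_insert_break_after_n_words text n → Spec_insert_break_after_n_words text n (insert_break_after_n_words text n)

-- ===== LEMMAS AND PROOFS =====

-- words produced by split() never contain a whitespace character
theorem split₀_go_no_space (s cur : List Char) (acc : List (List Char))
    (hcur : ∀ c ∈ cur, PySem.Chars.isspace c = false)
    (hacc : ∀ w ∈ acc, ∀ c ∈ w, PySem.Chars.isspace c = false) :
    ∀ w ∈ PySem.Chars.split₀.go s cur acc, ∀ c ∈ w, PySem.Chars.isspace c = false := by
  induction s generalizing cur acc with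
  | nil =>
    intro w hw
    unfold PySem.Chars.split₀.go at hw
    split at hw
    · intro c hc
      exact hacc _ (by simpa using hw) c hc
    · rcases List.mem_cons.mp (List.mem_reverse.mp hw) with h | h
      · intro c hc; subst h; exact hcur c (List.mem_reverse.mp hc)
      · exact hacc _ h
  | cons a rest ih =>
    intro w hw
    unfold PySem.Chars.split₀.go at hw
    by_cases hsp : PySem.Chars.isspace a = true
    · rw [if_pos hsp] at hw
      split at hw
      · exact ih [] acc (by simp) hacc w hw
      · refine ih [] (cur.reverse :: acc) (by simp) ?_ w hw
        intro w' hw' c hc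
        rcases List.mem_cons.mp hw' with h | h
        · subst h; exact hcur c (List.mem_reverse.mp hc)
        · exact hacc _ h c hc
    · rw [if_neg hsp] at hw
      refine ih (a :: cur) acc ?_ hacc w hw
      intro c hc
      rcases List.mem_cons.mp hc with h | h
      · subst h; simpa using hsp
      · exact hcur c h

theorem split₀_no_space (t : String) :
    ∀ w ∈ PySem.Str.split₀ t, (' ' : Char) ∉ w.toList := by
  intro w hw hsp
  have hmem : w.toList ∈ PySem.Chars.split₀ t.toList := by
    rw [← PySem.Str.split₀_map_toList]
    exact List.mem_map_of_mem hw
  have := split₀_go_no_space t.toList [] [] (by simp) (by simp) _ hmem ' ' hsp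
  simp [PySem.Chars.isspace] at this

-- each value the scan looks up contains a space
theorem satz_values_space :
    ∀ c ∈ satzzeichen.keys, (' ' : Char) ∈ (satzzeichen.getD c "").toList := by
  decide

-- hence the punctuation scan in A's loop is always false on a split() token
theorem check_false (w : String) (hw : (' ' : Char) ∉ w.toList) :
    (satzzeichen.keys.any (fun c => PySem.Str.isIn (satzzeichen.getD c "") w)) = false := by
  rw [List.any_eq_false]
  intro c hc
  rw [Bool.not_eq_true, PySem.Str.isIn, PySem.Chars.isIn_eq_false_iff]
  intro hinf
  exact hw (hinf.subset (satz_values_space c hc))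

def brkS : String := "<break time=\"6s\"/>"

-- the reference recursion both loops reduce to: blocks of k words, a break after each full block
def chunk (k : Nat) (ws : List String) : List String :=
  if _h : k = 0 ∨ ws.length < k then ws
  else ws.take k ++ brkS :: chunk k (ws.drop k)
termination_by ws.length
decreasing_by
  simp only [List.length_drop]
  omega

theorem chunk_eq (k : Nat) (ws : List String) :
    chunk k ws = if k = 0 ∨ ws.length < k then ws
      else ws.take k ++ brkS :: chunk k (ws.drop k) := by
  rw [chunk]; exact dite_eq_ite

-- A's counting loop with the dead scan removed
def fA (n : Int) (st : Int × List String) (word : String) : Int × List String :=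
  if st.1 + 1 == n then (0, st.2 ++ [word] ++ [brkS]) else (st.1 + 1, st.2 ++ [word])

theorem foldA_n_nonpos (n : Int) (hn : n ≤ 0) (ws : List String) :
    ∀ c acc, 0 ≤ c → (ws.foldl (fA n) (c, acc)).2 = acc ++ ws := by
  induction ws with
  | nil => intro c acc _; simp
  | cons w ws ih =>
    intro c acc hc
    have hb : (c + 1 == n) = false := by simp; omega
    simp only [List.foldl_cons, fA, hb, Bool.false_eq_true, if_false]
    rw [ih (c + 1) (acc ++ [w]) (by omega)]
    simp

def chunkC (n : Int) (c : Int) : List String → List String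
  | [] => []
  | w :: ws => if c + 1 == n then w :: brkS :: chunkC n 0 ws else w :: chunkC n (c + 1) ws

theorem foldA_eq_chunkC (n : Int) (ws : List String) :
    ∀ c acc, (ws.foldl (fA n) (c, acc)).2 = acc ++ chunkC n c ws := by
  induction ws with
  | nil => intro c acc; simp [chunkC]
  | cons w ws ih =>
    intro c acc
    by_cases h : c + 1 = n
    · simp only [List.foldl_cons, fA, h, BEq.rfl, if_true, chunkC]
      rw [ih 0 _]
      simp
    · have hb : (c + 1 == n) = false := by simpa using h
      simp only [List.foldl_cons, fA, hb, Bool.false_eq_true, if_false, chunkC]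
      rw [ih (c + 1) _]
      simp

theorem chunkC_eq_chunk (n : Int) (hn : 0 < n) :
    ∀ N ws c, ws.length ≤ N → 0 ≤ c → c < n →
      chunkC n c ws =
        if ws.length < (n - c).toNat then ws
        else ws.take (n - c).toNat ++ brkS :: chunk n.toNat (ws.drop (n - c).toNat) := by
  intro N
  induction N with
  | zero =>
    intro ws c hlen hc hcn
    have hws : ws = [] := List.length_eq_zero_iff.mp (Nat.le_zero.mp hlen)
    subst hws
    have h1 : 0 < (n - c).toNat := by omega
    simp [chunkC, h1]
  | succ N ih =>
    intro ws c hlen hc hcn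
    cases ws with
    | nil =>
      have h1 : 0 < (n - c).toNat := by omega
      simp [chunkC, h1]
    | cons w ws =>
      simp only [List.length_cons] at hlen
      by_cases h : c + 1 = n
      · have h1 : (n - c).toNat = 1 := by omega
        have hch : chunkC n 0 ws = chunk n.toNat ws := by
          rw [ih ws 0 (by omega) le_rfl hn]
          conv_rhs => rw [chunk_eq]
          by_cases hcond : ws.length < n.toNat
          · rw [if_pos (by omega), if_pos (Or.inr hcond)]
          · rw [if_neg (by omega), if_neg (by omega)]
            simp only [Int.sub_zero]
        simp only [chunkC, h, BEq.rfl, if_true, h1]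
        rw [hch, if_neg (by simp)]
        simp
      · have hm : (n - c).toNat = (n - (c + 1)).toNat + 1 := by omega
        have hb : (c + 1 == n) = false := by simpa using h
        simp only [chunkC, hb, Bool.false_eq_true, if_false, hm]
        rw [ih ws (c + 1) (by omega) (by omega) (by omega)]
        by_cases hcond : ws.length < (n - (c + 1)).toNat
        · rw [if_pos hcond, if_pos (by simp only [List.length_cons]; omega)]
        · rw [if_neg hcond, if_neg (by simp only [List.length_cons]; omega)]
          simp [List.take_succ_cons, List.drop_succ_cons]

theorem chunkC_zero_eq_chunk (n : Int) (hn : 0 < n) (ws : List String) :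
    chunkC n 0 ws = chunk n.toNat ws := by
  rw [chunkC_eq_chunk n hn ws.length ws 0 le_rfl le_rfl hn]
  conv_rhs => rw [chunk_eq]
  by_cases hcond : ws.length < n.toNat
  · rw [if_pos (by omega), if_pos (Or.inr hcond)]
  · rw [if_neg (by omega), if_neg (by omega)]
    simp only [Int.sub_zero]

-- B's loop body
def gB (n : Int) (ws : List String) (out : List String) (i : Int) : List String :=
  let block := PySem.List.slice ws (some i) (some (i + n))
  let out := out ++ block
  if ((block.length : Int) == n) then out ++ [brkS] else out

theorem pyRange_pos_pairwise (a b s : Int) (hs : 0 < s) :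
    (PySem.List.pyRange a b s).Pairwise (· < ·) := by
  rw [PySem.List.pyRange_of_pos _ _ hs]
  refine List.pairwise_lt_range.map _ ?_
  intro i j hij
  have h := mul_lt_mul_of_pos_left (Int.ofNat_lt.mpr hij) hs
  linarith

theorem pyRange_pos_cons (a b s : Int) (hs : 0 < s) (hab : a < b) :
    PySem.List.pyRange a b s = a :: PySem.List.pyRange (a + s) b s := by
  have h1 := pyRange_pos_pairwise a b s hs
  have h2 : (a :: PySem.List.pyRange (a + s) b s).Pairwise (· < ·) := by
    refine List.pairwise_cons.mpr ⟨?_, pyRange_pos_pairwise _ _ _ hs⟩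
    intro x hx
    rcases (PySem.List.mem_pyRange_iff_of_pos hs x).mp hx with ⟨hx1, _, _⟩
    omega
  have hmem : ∀ x : Int, x ∈ PySem.List.pyRange a b s ↔ x ∈ a :: PySem.List.pyRange (a + s) b s := by
    intro x
    simp only [List.mem_cons, PySem.List.mem_pyRange_iff_of_pos hs]
    constructor
    · rintro ⟨hax, hxb, d, hd⟩
      by_cases hxa : x = a
      · exact Or.inl hxa
      · have hax' : a < x := lt_of_le_of_ne hax (Ne.symm hxa)
        have hd1 : 1 ≤ d := by
          by_contra hcon
          rw [not_le] at hcon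
          have hle : s * d ≤ 0 := mul_nonpos_iff.mpr (Or.inl ⟨hs.le, by omega⟩)
          linarith
        have hsd : s * 1 ≤ s * d := mul_le_mul_of_nonneg_left hd1 hs.le
        exact Or.inr ⟨by linarith, hxb, d - 1, by linear_combination hd⟩
    · rintro (rfl | ⟨hax, hxb, d, hd⟩)
      · exact ⟨le_rfl, by assumption, 0, by ring⟩
      · exact ⟨by linarith, hxb, d + 1, by linear_combination hd⟩
  have nd1 : (PySem.List.pyRange a b s).Nodup := h1.imp ne_of_lt
  have nd2 : (a :: PySem.List.pyRange (a + s) b s).Nodup := h2.imp ne_of_lt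
  have hperm : (PySem.List.pyRange a b s).Perm (a :: PySem.List.pyRange (a + s) b s) :=
    List.perm_of_nodup_nodup_toFinset_eq nd1 nd2 (Finset.ext fun x => by
      simp only [List.mem_toFinset]; exact hmem x)
  exact hperm.eq_of_pairwise (fun x y _ _ hxy hyx => absurd hyx (lt_asymm hxy)) h1 h2

-- past the end the range is empty
theorem pyRange_pos_nil (a b s : Int) (hs : 0 < s) (hab : b ≤ a) :
    PySem.List.pyRange a b s = [] := by
  rw [PySem.List.pyRange_of_pos _ _ hs, if_neg (by omega)]
  simp

-- shifting the loop by one block: the tail of the range over ws is the full range over ws.drop k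
theorem foldB_shift (n : Int) (hn : 0 < n) (ws : List String) (acc : List String) :
    (PySem.List.pyRange n (ws.length : Int) n).foldl (gB n ws) acc
      = (PySem.List.pyRange 0 ((ws.length : Int) - n) n).foldl (gB n (ws.drop n.toNat)) acc := by
  rw [PySem.List.pyRange_of_pos n (ws.length : Int) hn,
      PySem.List.pyRange_of_pos 0 ((ws.length : Int) - n) hn]
  have hcount : (if n < (ws.length : Int) then (((ws.length : Int) - n + n - 1) / n).toNat else 0)
      = (if 0 < (ws.length : Int) - n then (((ws.length : Int) - n - 0 + n - 1) / n).toNat else 0) := by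
    by_cases hc : n < (ws.length : Int)
    · rw [if_pos hc, if_pos (by omega)]
      ring_nf
    · rw [if_neg hc, if_neg (by omega)]
  rw [hcount, List.foldl_map, List.foldl_map]
  congr 1
  funext out j
  have hm : 0 ≤ n * (j : Int) := mul_nonneg hn.le (Int.natCast_nonneg j)
  have hblock : PySem.List.slice ws (some (n + n * (j : Int))) (some (n + n * (j : Int) + n))
      = PySem.List.slice (ws.drop n.toNat) (some (0 + n * (j : Int))) (some (0 + n * (j : Int) + n)) := by
    generalize hmm : n * (j : Int) = m at hm ⊢
    rw [PySem.List.slice_toNat ws (by omega) (by omega),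
        PySem.List.slice_toNat (ws.drop n.toNat) (by omega) (by omega),
        List.drop_drop]
    congr 1
    · omega
    · congr 1
      omega
  simp only [gB, hblock]

theorem foldB_eq_chunk (n : Int) (hn : 0 < n) :
    ∀ N (ws : List String) (acc : List String), ws.length ≤ N →
      ((PySem.List.pyRange 0 (ws.length : Int) n).foldl (gB n ws) acc) = acc ++ chunk n.toNat ws := by
  intro N
  induction N with
  | zero =>
    intro ws acc hlen
    have hws : ws = [] := List.length_eq_zero_iff.mp (Nat.le_zero.mp hlen)
    subst hws
    simp only [List.length_nil, Nat.cast_zero]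
    rw [pyRange_pos_nil 0 0 n hn le_rfl]
    rw [chunk_eq, if_pos (Or.inr (by omega))]
    simp
  | succ N ih =>
    intro ws acc hlen
    cases hws : ws with
    | nil =>
      simp only [List.length_nil, Nat.cast_zero]
      rw [pyRange_pos_nil 0 0 n hn le_rfl, chunk_eq,
        if_pos (Or.inr (by simp only [List.length_nil]; omega))]
      simp
    | cons w rest =>
      rw [← hws]
      have hL : 1 ≤ ws.length := by rw [hws]; simp
      rw [pyRange_pos_cons 0 (ws.length : Int) n hn (by exact_mod_cast hL), List.foldl_cons]
      have hblock0 : PySem.List.slice ws (some 0) (some (0 + n)) = ws.take n.toNat := by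
        rw [PySem.List.slice_zero_start, zero_add, PySem.List.slice_to ws (le_of_lt hn)]
      by_cases hk : n.toNat ≤ ws.length
      · have hlenb : ((ws.take n.toNat).length : Int) = n := by
          simp only [List.length_take]
          omega
        have hstep : gB n ws acc 0 = acc ++ ws.take n.toNat ++ [brkS] := by
          simp only [gB, hblock0, hlenb, BEq.rfl, if_true]
        rw [hstep, zero_add, foldB_shift n hn ws]
        have hdl : (((ws.drop n.toNat).length : Int)) = (ws.length : Int) - n := by
          simp only [List.length_drop]
          omega
        rw [← hdl, ih (ws.drop n.toNat) _ (by simp only [List.length_drop]; omega)]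
        conv_rhs => rw [chunk_eq]
        rw [if_neg (by omega)]
        simp
      · have hlenb : ((ws.take n.toNat).length : Int) ≠ n := by
          simp only [List.length_take]
          omega
        have hstep : gB n ws acc 0 = acc ++ ws.take n.toNat := by
          simp only [gB, hblock0]
          rw [if_neg (by simpa using hlenb)]
        rw [hstep, zero_add, pyRange_pos_nil n (ws.length : Int) n hn (by omega), List.foldl_nil]
        rw [chunk_eq, if_pos (Or.inr (by omega))]
        rw [List.take_of_length_le (by omega)]

-- ===== VERDICT (by name: the statement is the Claim_ definition above) =====
theorem insert_break_after_n_words_spec : Claim_equal_insert_break_after_n_words := by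
  intro text n _
  unfold Spec_insert_break_after_n_words insert_break_after_n_words insert_break_after_n_words_alt
  simp only []
  have hcongr : (PySem.Str.split₀ text).foldl
      (fun (st : Int × List String) (word : String) =>
        let new_words := st.2 ++ [word]
        let word_count :=
          if !(satzzeichen.keys.any (fun c => PySem.Str.isIn (satzzeichen.getD c "") word))
            then st.1 + 1 else 0
        if word_count == n then (0, new_words ++ ["<break time=\"6s\"/>"])
        else (word_count, new_words)) ((0 : Int), ([] : List String))
      = (PySem.Str.split₀ text).foldl (fA n) ((0 : Int), ([] : List String)) := by
    refine PySem.List.foldl_congr_mem _ _ _ _ ?_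
    intro st word hword
    rw [check_false word (split₀_no_space text word hword)]
    rfl
  rw [hcongr]
  by_cases hn : n ≤ 0
  · rw [if_pos hn, foldA_n_nonpos n hn _ 0 [] le_rfl]
    simp
  · rw [if_neg hn]
    have hBB := foldB_eq_chunk n (by omega) (PySem.Str.split₀ text).length
      (PySem.Str.split₀ text) [] le_rfl
    simp only [List.nil_append] at hBB
    rw [foldA_eq_chunkC n _ 0 [], chunkC_zero_eq_chunk n (by omega)]
    simp only [List.nil_append]
    exact congrArg (PySem.Str.join " ") hBB.symm
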